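-- pv_equiv track=rewrite | github.com/Dylanlafranky/ARA-GIT | archive/numbered_tests/243BL15_sp500_prediction.py | strategy_ara_regime
-- ===== SOURCE A (Python) =====
-- def compute_ara_from_series(series):
--     """Compute ARA from a time series using consecutive comparisons."""
--     ups = 0
--     downs = 0
--     for i in range(len(series) - 1):
--         if series[i+1] > series[i]:
--             ups += 1
--         elif series[i+1] < series[i]:
--             downs += 1
--     if downs == 0:
--         return 2.0
--     return ups / downs
--
-- def strategy_ara_regime(train, test, all_returns, window=24):
--     """Use rolling ARA to predict regime. High ARA = engine = up, low = consumer = down."""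
--     preds = []
--     for i in range(len(test)):
--         idx = len(train) + i
--         chunk = all_returns[max(0, idx-window):idx]
--         ara = compute_ara_from_series(chunk)
--         # Engine (ARA > 1) = accumulating = predict UP
--         # Consumer (ARA < 1) = releasing = predict DOWN
--         preds.append(1 if ara > 1.0 else 0)
--     return preds
-- ===== SOURCE B (Python) =====
-- def strategy_ara_regime(train, test, all_returns, window=24):
--     """Prefix-sum reformulation: count up/down consecutive moves once, answer each
--     test point in O(1). ara > 1.0 holds exactly when downs == 0 or ups > downs."""
--     L = len(all_returns)
--     pu = [0]
--     pdn = [0]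
--     for j in range(L - 1):
--         pu.append(pu[-1] + (1 if all_returns[j + 1] > all_returns[j] else 0))
--         pdn.append(pdn[-1] + (1 if all_returns[j + 1] < all_returns[j] else 0))
--     base = len(train)
--     preds = []
--     for i in range(len(test)):
--         idx = base + i
--         a = min(max(0, idx - window), L)
--         b = min(idx, L)
--         if b >= a + 2:
--             ups = pu[b - 1] - pu[a]
--             downs = pdn[b - 1] - pdn[a]
--         else:
--             ups = 0
--             downs = 0
--         preds.append(1 if downs == 0 or ups > downs else 0)
--     return preds
-- ===== Notes on version B (the rewrite author's own statement) =====
-- stated objective: faster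
-- what changed: Replaces the per-test-point rescan of the window (recounting up/down consecutive moves and a float ratio) by one pass of prefix sums over the difference signs of all_returns plus an O(1) integer lookup per test point, deciding ara > 1.0 exactly as downs == 0 or ups > downs.
import Mathlib
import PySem

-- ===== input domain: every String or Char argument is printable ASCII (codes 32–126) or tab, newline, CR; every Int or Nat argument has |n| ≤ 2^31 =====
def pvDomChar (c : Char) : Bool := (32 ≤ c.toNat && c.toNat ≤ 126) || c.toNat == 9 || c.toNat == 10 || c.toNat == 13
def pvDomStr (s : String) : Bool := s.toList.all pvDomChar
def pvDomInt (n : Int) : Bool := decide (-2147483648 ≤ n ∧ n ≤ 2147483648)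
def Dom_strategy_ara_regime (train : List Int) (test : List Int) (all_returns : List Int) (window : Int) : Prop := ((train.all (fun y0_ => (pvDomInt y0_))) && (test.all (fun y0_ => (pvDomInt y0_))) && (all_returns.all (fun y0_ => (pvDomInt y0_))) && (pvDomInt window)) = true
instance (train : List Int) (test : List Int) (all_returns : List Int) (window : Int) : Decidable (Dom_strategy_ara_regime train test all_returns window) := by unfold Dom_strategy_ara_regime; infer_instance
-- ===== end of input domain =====

-- B replaces A's per-test-point window rescan by prefix sums over difference signs (one pass + O(1) per test point); proved to return A's exact value.

-- ===== PORT A =====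
-- Python floats appear only as `2.0`, `ups / downs` and `> 1.0`; ported as exact rationals,
-- which is exact whenever the counts are below 2^53 (they are bounded by the list length).
def compute_ara_from_series (series : List Int) : ℚ :=
  let ud := (PySem.List.pyRange 0 ((series.length : Int) - 1) 1).foldl
    (fun (s : Int × Int) i =>
      if PySem.List.pyGetD series (i + 1) 0 > PySem.List.pyGetD series i 0 then (s.1 + 1, s.2)
      else if PySem.List.pyGetD series (i + 1) 0 < PySem.List.pyGetD series i 0 then (s.1, s.2 + 1)
      else s) (0, 0)
  if ud.2 = 0 then 2 else (ud.1 : ℚ) / (ud.2 : ℚ)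

def strategy_ara_regime (train : List Int) (test : List Int) (all_returns : List Int) (window : Int) : List Int :=
  (PySem.List.pyRange 0 (test.length : Int) 1).foldl
    (fun (preds : List Int) i =>
      let idx : Int := (train.length : Int) + i
      let chunk := PySem.List.slice all_returns (some (max 0 (idx - window))) (some idx)
      let ara := compute_ara_from_series chunk
      preds ++ [if (1 : ℚ) < ara then 1 else 0]) []

-- ===== PORT B =====
def strategy_ara_regime_alt (train : List Int) (test : List Int) (all_returns : List Int) (window : Int) : List Int :=
  let L : Int := (all_returns.length : Int)
  let pp := (PySem.List.pyRange 0 (L - 1) 1).foldl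
    (fun (s : List Int × List Int) j =>
      (s.1 ++ [PySem.List.pyGetD s.1 (-1) 0 +
          (if PySem.List.pyGetD all_returns (j + 1) 0 > PySem.List.pyGetD all_returns j 0 then 1 else 0)],
       s.2 ++ [PySem.List.pyGetD s.2 (-1) 0 +
          (if PySem.List.pyGetD all_returns (j + 1) 0 < PySem.List.pyGetD all_returns j 0 then 1 else 0)]))
    ([0], [0])
  let base : Int := (train.length : Int)
  (PySem.List.pyRange 0 (test.length : Int) 1).foldl
    (fun (preds : List Int) i =>
      let idx : Int := base + i
      let a : Int := min (max 0 (idx - window)) L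
      let b : Int := min idx L
      let ud : Int × Int :=
        if b ≥ a + 2 then
          (PySem.List.pyGetD pp.1 (b - 1) 0 - PySem.List.pyGetD pp.1 a 0,
           PySem.List.pyGetD pp.2 (b - 1) 0 - PySem.List.pyGetD pp.2 a 0)
        else (0, 0)
      preds ++ [if ud.2 = 0 ∨ ud.1 > ud.2 then 1 else 0]) []

-- ===== PRECONDITION & SPEC =====
def Spec_strategy_ara_regime (train : List Int) (test : List Int) (all_returns : List Int) (window : Int) (out : List Int) : Prop := out = strategy_ara_regime_alt train test all_returns window
instance (train : List Int) (test : List Int) (all_returns : List Int) (window : Int) (out : List Int) : Decidable (Spec_strategy_ara_regime train test all_returns window out) := by unfold Spec_strategy_ara_regime; infer_instance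

-- ===== CLAIM (what is proved, stated in full; the proofs are below) =====
def Claim_equal_strategy_ara_regime : Prop := ∀ (train : List Int) (test : List Int) (all_returns : List Int) (window : Int), Dom_strategy_ara_regime train test all_returns window → Spec_strategy_ara_regime train test all_returns window (strategy_ara_regime train test all_returns window)

-- ===== LEMMAS AND PROOFS =====

/-- number of consecutive up-moves of a series (what A's inner loop counts). -/
def upc : List Int → Int
  | [] => 0
  | [_] => 0
  | x :: y :: t => (if y > x then (1:Int) else 0) + upc (y :: t)

/-- number of consecutive down-moves of a series. -/
def dnc : List Int → Int
  | [] => 0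
  | [_] => 0
  | x :: y :: t => (if y < x then (1:Int) else 0) + dnc (y :: t)

/-- prefix sum of up-move indicators of `r`: `Sup r k = Σ_{j<k} [r[j+1] > r[j]]`. -/
def Sup (r : List Int) : ℕ → Int
  | 0 => 0
  | k + 1 => Sup r k + (if r.getD (k + 1) 0 > r.getD k 0 then 1 else 0)

def Sdn (r : List Int) : ℕ → Int
  | 0 => 0
  | k + 1 => Sdn r k + (if r.getD (k + 1) 0 < r.getD k 0 then 1 else 0)


lemma upc_cons_cons (x y : Int) (t : List Int) :
    upc (x :: y :: t) = (if y > x then (1:Int) else 0) + upc (y :: t) := rfl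

lemma dnc_cons_cons (x y : Int) (t : List Int) :
    dnc (x :: y :: t) = (if y < x then (1:Int) else 0) + dnc (y :: t) := rfl

lemma dnc_nonneg : ∀ l : List Int, 0 ≤ dnc l := by
  intro l
  induction l with
  | nil => simp [dnc]
  | cons x t ih =>
    cases t with
    | nil => simp [dnc]
    | cons y t2 => rw [dnc_cons_cons]; split_ifs <;> omega

lemma counts_short (l : List Int) (h : l.length ≤ 1) : upc l = 0 ∧ dnc l = 0 := by
  cases l with
  | nil => exact ⟨rfl, rfl⟩
  | cons x t =>
    cases t with
    | nil => exact ⟨rfl, rfl⟩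
    | cons y t2 => simp at h

/-- A's inner index loop, on ℕ indices, computes the two structural counters. -/
lemma countFold (l : List Int) (u d : Int) :
    (List.range (l.length - 1)).foldl
      (fun (s : Int × Int) (i : ℕ) =>
        if l.getD (i + 1) 0 > l.getD i 0 then (s.1 + 1, s.2)
        else if l.getD (i + 1) 0 < l.getD i 0 then (s.1, s.2 + 1)
        else s) (u, d)
    = (u + upc l, d + dnc l) := by
  induction l generalizing u d with
  | nil => simp [upc, dnc]
  | cons x t ih =>
    cases t with
    | nil => simp [upc, dnc]
    | cons y t2 =>
      have hl : (x :: y :: t2 : List Int).length - 1 = t2.length + 1 := by simp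
      rw [hl, List.range_succ_eq_map, List.foldl_cons, List.foldl_map]
      have hfun : (fun (s : Int × Int) (i : ℕ) =>
          if (x :: y :: t2 : List Int).getD (Nat.succ i + 1) 0 > (x :: y :: t2 : List Int).getD (Nat.succ i) 0 then (s.1 + 1, s.2)
          else if (x :: y :: t2 : List Int).getD (Nat.succ i + 1) 0 < (x :: y :: t2 : List Int).getD (Nat.succ i) 0 then (s.1, s.2 + 1)
          else s)
          = (fun (s : Int × Int) (i : ℕ) =>
          if (y :: t2 : List Int).getD (i + 1) 0 > (y :: t2 : List Int).getD i 0 then (s.1 + 1, s.2)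
          else if (y :: t2 : List Int).getD (i + 1) 0 < (y :: t2 : List Int).getD i 0 then (s.1, s.2 + 1)
          else s) := by
        funext s i
        simp
      rw [hfun]
      have ht : t2.length = (y :: t2 : List Int).length - 1 := by simp
      rw [ht, ih]
      rw [upc_cons_cons, dnc_cons_cons]
      have h1 : (x :: y :: t2 : List Int).getD (0 + 1) 0 = y := rfl
      have h0 : (x :: y :: t2 : List Int).getD 0 0 = x := rfl
      rw [h1, h0]
      split_ifs <;> simp [Prod.ext_iff] <;> omega

/-- A's helper returns the rational `2` / `ups/downs` of the structural counters. -/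
lemma compute_ara_eq (l : List Int) :
    compute_ara_from_series l
      = if dnc l = 0 then 2 else ((upc l : ℚ)) / ((dnc l : ℚ)) := by
  unfold compute_ara_from_series
  cases l with
  | nil =>
    rw [PySem.List.pyRange_one_eq_nil (by norm_num)]
    simp [dnc]
  | cons x t =>
    have hb : ((x :: t : List Int).length : Int) - 1 = (t.length : ℕ) := by
      simp
    rw [hb, PySem.List.pyRange_zero_natCast, List.foldl_map]
    have hfun : (fun (s : Int × Int) (i : ℕ) =>
        if PySem.List.pyGetD (x :: t) ((i : Int) + 1) 0 > PySem.List.pyGetD (x :: t) (i : Int) 0 then (s.1 + 1, s.2)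
        else if PySem.List.pyGetD (x :: t) ((i : Int) + 1) 0 < PySem.List.pyGetD (x :: t) (i : Int) 0 then (s.1, s.2 + 1)
        else s)
        = (fun (s : Int × Int) (i : ℕ) =>
        if (x :: t : List Int).getD (i + 1) 0 > (x :: t : List Int).getD i 0 then (s.1 + 1, s.2)
        else if (x :: t : List Int).getD (i + 1) 0 < (x :: t : List Int).getD i 0 then (s.1, s.2 + 1)
        else s) := by
      funext s i
      have : ((i : Int) + 1) = ((i + 1 : ℕ) : Int) := by push_cast; ring
      rw [this, PySem.List.pyGetD_natCast, PySem.List.pyGetD_natCast]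
    rw [hfun]
    have ht : t.length = (x :: t : List Int).length - 1 := by simp
    rw [ht, countFold]
    simp

/-- counters of a window slice = prefix-sum differences. -/
lemma counts_interval (r : List Int) :
    ∀ (m a : ℕ), 1 ≤ m → a + m ≤ r.length →
      upc ((r.drop a).take m) = Sup r (a + m - 1) - Sup r a ∧
      dnc ((r.drop a).take m) = Sdn r (a + m - 1) - Sdn r a := by
  intro m
  induction m with
  | zero => omega
  | succ m ih =>
    intro a _ h2
    have ha : a < r.length := by omega
    cases m with
    | zero =>
      rw [List.drop_eq_getElem_cons ha, List.take_succ_cons, List.take_zero]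
      simp [upc, dnc]
    | succ m' =>
      have ha1 : a + 1 < r.length := by omega
      have hrec := ih (a + 1) (by omega) (by omega)
      rw [List.drop_eq_getElem_cons ha1, List.take_succ_cons] at hrec
      rw [List.drop_eq_getElem_cons ha, List.take_succ_cons,
          List.drop_eq_getElem_cons ha1, List.take_succ_cons,
          upc_cons_cons, dnc_cons_cons, hrec.1, hrec.2]
      have hSup : Sup r (a + 1) = Sup r a + (if r.getD (a + 1) 0 > r.getD a 0 then 1 else 0) := rfl
      have hSdn : Sdn r (a + 1) = Sdn r a + (if r.getD (a + 1) 0 < r.getD a 0 then 1 else 0) := rfl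
      have hg1 : r.getD (a + 1) 0 = r[a + 1] := List.getD_eq_getElem r 0 ha1
      have hg0 : r.getD a 0 = r[a] := List.getD_eq_getElem r 0 ha
      have he : a + 1 + (m' + 1) - 1 = a + (m' + 1 + 1) - 1 := by omega
      rw [he] at *
      constructor
      · rw [hSup] at *
        rw [hg1, hg0] at *
        split_ifs <;> omega
      · rw [hSdn] at *
        rw [hg1, hg0] at *
        split_ifs <;> omega

/-- B's prefix-building loop produces exactly the tables of `Sup`/`Sdn` values. -/
lemma puFold (r : List Int) (n : ℕ) :
    (List.range n).foldl
      (fun (s : List Int × List Int) (j : ℕ) =>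
        (s.1 ++ [PySem.List.pyGetD s.1 (-1) 0 +
            (if r.getD (j + 1) 0 > r.getD j 0 then (1:Int) else 0)],
         s.2 ++ [PySem.List.pyGetD s.2 (-1) 0 +
            (if r.getD (j + 1) 0 < r.getD j 0 then (1:Int) else 0)])) ([0], [0])
    = ((List.range (n + 1)).map (Sup r), (List.range (n + 1)).map (Sdn r)) := by
  induction n with
  | zero => simp [Sup, Sdn]
  | succ n ih =>
    rw [List.range_succ, List.foldl_append, ih, List.foldl_cons, List.foldl_nil]
    have hlast : ∀ f : ℕ → Int, PySem.List.pyGetD ((List.range (n + 1)).map f) (-1) 0 = f n := by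
      intro f
      rw [List.range_succ, List.map_append]
      simp [PySem.List.pyGetD, PySem.List.pyGet?_neg_one]
    rw [hlast, hlast]
    have hs : Sup r n + (if r.getD (n + 1) 0 > r.getD n 0 then (1:Int) else 0) = Sup r (n + 1) := rfl
    have hd : Sdn r n + (if r.getD (n + 1) 0 < r.getD n 0 then (1:Int) else 0) = Sdn r (n + 1) := rfl
    rw [hs, hd]
    simp [List.range_succ]

-- ===== VERDICT (by name: the statement is the Claim_ definition above) =====

lemma ppBridge (r : List Int) :
    (PySem.List.pyRange 0 ((r.length : Int) - 1) 1).foldl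
      (fun (s : List Int × List Int) (j : Int) =>
        (s.1 ++ [PySem.List.pyGetD s.1 (-1) 0 +
            (if PySem.List.pyGetD r (j + 1) 0 > PySem.List.pyGetD r j 0 then (1:Int) else 0)],
         s.2 ++ [PySem.List.pyGetD s.2 (-1) 0 +
            (if PySem.List.pyGetD r (j + 1) 0 < PySem.List.pyGetD r j 0 then (1:Int) else 0)])) ([0], [0])
    = ((List.range (max 1 r.length)).map (Sup r), (List.range (max 1 r.length)).map (Sdn r)) := by
  cases r with
  | nil =>
    rw [PySem.List.pyRange_one_eq_nil (by norm_num)]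
    simp [Sup, Sdn]
  | cons x t =>
    have hb : ((x :: t : List Int).length : Int) - 1 = (t.length : ℕ) := by simp
    rw [hb, PySem.List.pyRange_zero_natCast, List.foldl_map]
    have hfun : (fun (s : List Int × List Int) (j : ℕ) =>
        (s.1 ++ [PySem.List.pyGetD s.1 (-1) 0 +
            (if PySem.List.pyGetD (x :: t) ((j:Int) + 1) 0 > PySem.List.pyGetD (x :: t) (j:Int) 0 then (1:Int) else 0)],
         s.2 ++ [PySem.List.pyGetD s.2 (-1) 0 +
            (if PySem.List.pyGetD (x :: t) ((j:Int) + 1) 0 < PySem.List.pyGetD (x :: t) (j:Int) 0 then (1:Int) else 0)]))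
        = (fun (s : List Int × List Int) (j : ℕ) =>
        (s.1 ++ [PySem.List.pyGetD s.1 (-1) 0 +
            (if (x :: t : List Int).getD (j + 1) 0 > (x :: t : List Int).getD j 0 then (1:Int) else 0)],
         s.2 ++ [PySem.List.pyGetD s.2 (-1) 0 +
            (if (x :: t : List Int).getD (j + 1) 0 < (x :: t : List Int).getD j 0 then (1:Int) else 0)])) := by
      funext s j
      have : ((j : Int) + 1) = ((j + 1 : ℕ) : Int) := by push_cast; ring
      rw [this, PySem.List.pyGetD_natCast, PySem.List.pyGetD_natCast]
    rw [hfun, puFold]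
    have : max 1 (x :: t : List Int).length = t.length + 1 := by simp
    rw [this]


lemma pred_eq (u d : Int) (hd : 0 ≤ d) :
    (if (1:ℚ) < (if d = 0 then 2 else (u:ℚ) / (d:ℚ)) then (1:Int) else 0)
      = (if d = 0 ∨ u > d then 1 else 0) := by
  by_cases h : d = 0
  · simp [h]
  · have hdp : (0:ℚ) < (d:ℚ) := by
      have : 0 < d := lt_of_le_of_ne hd (Ne.symm h)
      exact_mod_cast this
    have hiff : ((1:ℚ) < (u:ℚ) / (d:ℚ)) ↔ d < u := by
      rw [one_lt_div hdp]
      exact_mod_cast Iff.rfl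
    rw [if_neg h]
    simp [hiff, h, gt_iff_lt]

lemma lookup_eq (f : ℕ → Int) (n : ℕ) (e : Int) (h1 : 0 ≤ e) (h2 : e < (n : Int)) :
    PySem.List.pyGetD ((List.range n).map f) e 0 = f e.toNat := by
  rw [show e = ((e.toNat : ℕ) : Int) by omega, PySem.List.pyGetD_natCast]
  exact PySem.List.getD_map_range f n e.toNat 0 (by omega)

lemma point_eq (r : List Int) (idx window : Int) (h0 : 0 ≤ idx) :
    (if (1:ℚ) < compute_ara_from_series
        (PySem.List.slice r (some (max 0 (idx - window))) (some idx)) then (1:Int) else 0) =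
    (if (if min idx ((r.length : Int)) ≥ min (max 0 (idx - window)) ((r.length : Int)) + 2 then
          (PySem.List.pyGetD (List.map (Sup r) (List.range (max 1 r.length))) (min idx ((r.length : Int)) - 1) 0 -
           PySem.List.pyGetD (List.map (Sup r) (List.range (max 1 r.length))) (min (max 0 (idx - window)) ((r.length : Int))) 0,
           PySem.List.pyGetD (List.map (Sdn r) (List.range (max 1 r.length))) (min idx ((r.length : Int)) - 1) 0 -
           PySem.List.pyGetD (List.map (Sdn r) (List.range (max 1 r.length))) (min (max 0 (idx - window)) ((r.length : Int))) 0)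
        else ((0:Int), (0:Int))).2 = 0 ∨
        (if min idx ((r.length : Int)) ≥ min (max 0 (idx - window)) ((r.length : Int)) + 2 then
          (PySem.List.pyGetD (List.map (Sup r) (List.range (max 1 r.length))) (min idx ((r.length : Int)) - 1) 0 -
           PySem.List.pyGetD (List.map (Sup r) (List.range (max 1 r.length))) (min (max 0 (idx - window)) ((r.length : Int))) 0,
           PySem.List.pyGetD (List.map (Sdn r) (List.range (max 1 r.length))) (min idx ((r.length : Int)) - 1) 0 -
           PySem.List.pyGetD (List.map (Sdn r) (List.range (max 1 r.length))) (min (max 0 (idx - window)) ((r.length : Int))) 0)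
        else ((0:Int), (0:Int))).1 >
        (if min idx ((r.length : Int)) ≥ min (max 0 (idx - window)) ((r.length : Int)) + 2 then
          (PySem.List.pyGetD (List.map (Sup r) (List.range (max 1 r.length))) (min idx ((r.length : Int)) - 1) 0 -
           PySem.List.pyGetD (List.map (Sup r) (List.range (max 1 r.length))) (min (max 0 (idx - window)) ((r.length : Int))) 0,
           PySem.List.pyGetD (List.map (Sdn r) (List.range (max 1 r.length))) (min idx ((r.length : Int)) - 1) 0 -
           PySem.List.pyGetD (List.map (Sdn r) (List.range (max 1 r.length))) (min (max 0 (idx - window)) ((r.length : Int))) 0)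
        else ((0:Int), (0:Int))).2 then (1:Int) else 0) := by
  by_cases hge : min idx ((r.length : Int)) ≥ min (max 0 (idx - window)) ((r.length : Int)) + 2
  · rw [if_pos hge]
    have hlen1 : (1 : ℕ) ≤ r.length := by omega
    have hmax : max 1 r.length = r.length := by omega
    rw [hmax]
    rw [lookup_eq (Sup r) r.length _ (by omega) (by omega),
        lookup_eq (Sup r) r.length _ (by omega) (by omega),
        lookup_eq (Sdn r) r.length _ (by omega) (by omega),
        lookup_eq (Sdn r) r.length _ (by omega) (by omega)]
    have hsl : PySem.List.slice r (some (max 0 (idx - window))) (some idx)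
        = (r.drop (min (max 0 (idx - window)) ((r.length : Int))).toNat).take
            ((min idx ((r.length : Int))).toNat - (min (max 0 (idx - window)) ((r.length : Int))).toNat) := by
      rw [PySem.List.slice_toNat r (by omega) h0]
      rw [show (max 0 (idx - window)).toNat = (min (max 0 (idx - window)) ((r.length : Int))).toNat by omega]
      rw [List.take_eq_take_min, List.take_eq_take_min]
      congr 1
      simp [List.length_drop]
      omega
    rw [hsl, compute_ara_eq]
    obtain ⟨hu, hd⟩ := counts_interval r
      ((min idx ((r.length : Int))).toNat - (min (max 0 (idx - window)) ((r.length : Int))).toNat)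
      (min (max 0 (idx - window)) ((r.length : Int))).toNat (by omega) (by omega)
    have hidx1 : (min (max 0 (idx - window)) ((r.length : Int))).toNat +
        ((min idx ((r.length : Int))).toNat - (min (max 0 (idx - window)) ((r.length : Int))).toNat) - 1
        = (min idx ((r.length : Int)) - 1).toNat := by omega
    rw [hidx1] at hu hd
    have hdn : 0 ≤ dnc ((r.drop (min (max 0 (idx - window)) ((r.length : Int))).toNat).take
        ((min idx ((r.length : Int))).toNat - (min (max 0 (idx - window)) ((r.length : Int))).toNat)) :=
      dnc_nonneg _
    rw [hd] at hdn
    rw [hu, hd]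
    exact pred_eq _ _ hdn
  · rw [if_neg hge]
    have hlen : (PySem.List.slice r (some (max 0 (idx - window))) (some idx)).length ≤ 1 := by
      rw [PySem.List.slice_toNat r (by omega) h0]
      simp [List.length_take, List.length_drop]
      omega
    obtain ⟨hu0, hd0⟩ := counts_short _ hlen
    rw [compute_ara_eq, hd0]
    norm_num

theorem strategy_ara_regime_spec : Claim_equal_strategy_ara_regime := by
  intro train test r window _
  unfold Spec_strategy_ara_regime
  simp only [strategy_ara_regime, strategy_ara_regime_alt, ppBridge,
    PySem.List.foldl_append_singleton_eq_map, List.nil_append]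
  apply List.map_congr_left
  intro i hi
  rw [PySem.List.mem_pyRange_one] at hi
  exact point_eq r ((train.length : Int) + i) window (by omega)
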